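-- pv_equiv track=rewrite | github.com/1024mb/gog-installer-update-checker | gog_installer_update_checker.py | dedup_installers_id
-- ===== SOURCE A (Python) =====
-- import copy
--
-- def dedup_installers_id(installers_dict: dict[str, str]) -> dict[str, dict[str, str]]:
--     id_list = set(installers_dict.values())
--
--     deduped_installers_dict_aux: dict[str, dict[str, str]] = {}
--
--     # TODO: Maybe don't do this? So people know they have the same installer in more than one location?
--     for product_id in id_list:
--         found = False
--
--         while not found:
--             for installer_path in sorted(installers_dict.keys()):  # type: str
--                 if installers_dict[installer_path] == product_id:
--                     found = True
--                     deduped_installers_dict_aux[installer_path] = {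
--                         "product_id": product_id
--                     }
--                     break
--
--     deduped_installers_dict: dict[str, dict[str, str]] = {}
--
--     for item in sorted(deduped_installers_dict_aux.keys()):
--         deduped_installers_dict[item] = copy.deepcopy(deduped_installers_dict_aux[item])
--
--     return deduped_installers_dict
-- ===== SOURCE B (Python) =====
-- def dedup_installers_id(installers_dict: dict[str, str]) -> dict[str, dict[str, str]]:
--     # One pass over the sorted paths: the first path carrying a product_id wins.
--     seen = set()
--     deduped = {}
--     for path in sorted(installers_dict):
--         pid = installers_dict[path]
--         if pid not in seen:
--             seen.add(pid)
--             deduped[path] = {"product_id": pid}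
--     return deduped
-- ===== Notes on version B (the rewrite author's own statement) =====
-- stated objective: faster
-- what changed: Instead of re-sorting and re-scanning the whole key list once per distinct product_id, B sorts the keys once and makes a single pass, keeping a path only if its product_id has not been seen yet.
import Mathlib
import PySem

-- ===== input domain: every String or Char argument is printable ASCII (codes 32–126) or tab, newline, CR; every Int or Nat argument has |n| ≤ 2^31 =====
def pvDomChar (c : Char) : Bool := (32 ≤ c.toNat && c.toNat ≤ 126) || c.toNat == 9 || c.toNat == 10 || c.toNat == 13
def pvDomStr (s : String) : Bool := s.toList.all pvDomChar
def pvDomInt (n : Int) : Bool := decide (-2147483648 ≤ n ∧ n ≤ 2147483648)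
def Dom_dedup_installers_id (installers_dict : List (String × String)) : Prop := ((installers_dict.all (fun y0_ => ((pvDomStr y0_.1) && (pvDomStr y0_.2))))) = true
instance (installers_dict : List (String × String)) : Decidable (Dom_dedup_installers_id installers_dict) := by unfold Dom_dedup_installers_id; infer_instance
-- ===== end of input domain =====

-- B sorts the keys once and keeps, in a single pass, the first path per product_id,
-- instead of A's re-sort-and-rescan of the whole key list once per distinct product_id.

-- ===== PORT A =====
def dedup_installers_id (installers_dict : List (String × String)) : List (String × List (String × String)) :=
  let d := PySem.Dict.ofList installers_dict
  -- id_list = set(installers_dict.values())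
  let id_list : PySem.Set String := PySem.Set.ofList d.values
  -- for product_id in id_list: while not found: for installer_path in sorted(keys): first match
  -- breaks.  find? is the first matching sorted key; it is always `some` (product_id is one of the
  -- values), which is exactly when the while-loop exits after its first round.  The final result
  -- does not depend on the (hash) iteration order of id_list: it is re-sorted by key below.
  let aux : PySem.Dict String (List (String × String)) :=
    id_list.foldl (fun aux product_id =>
      match (PySem.List.sorted d.keys (fun k => k) false).find?
              (fun installer_path => d.getD installer_path "" == product_id) with
      | some installer_path => aux.insert installer_path [("product_id", product_id)]
      | none => aux) PySem.Dict.empty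
  -- for item in sorted(aux.keys()): out[item] = copy.deepcopy(aux[item])
  -- (deepcopy is identity on immutable data; aux[item] is exact as getD since item ∈ aux.keys)
  let out : PySem.Dict String (List (String × String)) :=
    (PySem.List.sorted aux.keys (fun k => k) false).foldl
      (fun out item => out.insert item (aux.getD item [])) PySem.Dict.empty
  out.items

-- ===== PORT B =====
def dedup_installers_id_alt (installers_dict : List (String × String)) : List (String × List (String × String)) :=
  let d := PySem.Dict.ofList installers_dict
  -- seen = set(); deduped = {}; for path in sorted(installers_dict): ...
  let st :=
    (PySem.List.sorted d.keys (fun k => k) false).foldl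
      (fun (st : PySem.Dict String (List (String × String)) × PySem.Set String) path =>
        let pid := d.getD path ""   -- installers_dict[path]; exact: path ∈ keys
        if st.2.contains pid then st
        else (st.1.insert path [("product_id", pid)], st.2.add pid))
      (PySem.Dict.empty, PySem.Set.empty)
  st.1.items

-- ===== PRECONDITION & SPEC =====
def Spec_dedup_installers_id (installers_dict : List (String × String)) (out : List (String × List (String × String))) : Prop := out = dedup_installers_id_alt installers_dict
instance (installers_dict : List (String × String)) (out : List (String × List (String × String))) : Decidable (Spec_dedup_installers_id installers_dict out) := by unfold Spec_dedup_installers_id; infer_instance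

-- ===== CLAIM (what is proved, stated in full; the proofs are below) =====
def Claim_equal_dedup_installers_id : Prop := ∀ (installers_dict : List (String × String)), Dom_dedup_installers_id installers_dict → Spec_dedup_installers_id installers_dict (dedup_installers_id installers_dict)

-- ===== LEMMAS AND PROOFS =====

-- B's pass over the sorted key list, as a structural recursion (pidf k = installers_dict[k]).
def pvSel (pidf : String → String) : List String → PySem.Set String → List (String × List (String × String))
  | [], _ => []
  | k :: t, seen =>
    if seen.contains (pidf k) then pvSel pidf t seen
    else (k, [("product_id", pidf k)]) :: pvSel pidf t (seen.add (pidf k))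

-- B's foldl produces exactly pvSel (appended to the accumulated items).
theorem pv_contains_iff (s : PySem.Set String) (x : String) : s.contains x = true ↔ x ∈ s := by
  simp [PySem.Set.contains]

theorem pv_contains_false_iff (s : PySem.Set String) (x : String) : s.contains x = false ↔ x ∉ s := by
  simp [PySem.Set.contains]

theorem pvSel_foldl (pidf : String → String) (l : List String) :
    ∀ (out : PySem.Dict String (List (String × String))) (seen : PySem.Set String),
      (∀ k ∈ l, out.contains k = false) → l.Nodup →
      (List.foldl
        (fun (st : PySem.Dict String (List (String × String)) × PySem.Set String) path =>
          if st.2.contains (pidf path) then st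
          else (st.1.insert path [("product_id", pidf path)], st.2.add (pidf path)))
        (out, seen) l).1.items = out.items ++ pvSel pidf l seen := by
  induction l with
  | nil => intro out seen _ _; simp [pvSel]
  | cons k t ih =>
    intro out seen hfresh hnd
    simp only [List.foldl_cons]
    by_cases h : seen.contains (pidf k) = true
    · rw [if_pos h]
      rw [ih out seen (fun x hx => hfresh x (List.mem_cons_of_mem _ hx)) (List.nodup_cons.mp hnd).2]
      simp only [pvSel, if_pos h]
    · rw [if_neg h]
      have hk : out.contains k = false := hfresh k (List.mem_cons_self ..)
      have hfresh' : ∀ x ∈ t, (out.insert k [("product_id", pidf k)]).contains x = false := by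
        intro x hx
        rw [PySem.Dict.contains_insert]
        have hxk : x ≠ k := fun he => (List.nodup_cons.mp hnd).1 (he ▸ hx)
        simp [hxk, hfresh x (List.mem_cons_of_mem _ hx)]
      rw [ih _ _ hfresh' (List.nodup_cons.mp hnd).2]
      rw [PySem.Dict.items_insert_of_not_contains _ _ hk]
      simp only [pvSel, if_neg h, List.append_assoc, List.singleton_append]

-- every entry of pvSel is (k, [("product_id", pidf k)])
theorem pvSel_entries (pidf : String → String) (l : List String) :
    ∀ seen, pvSel pidf l seen
      = ((pvSel pidf l seen).map Prod.fst).map (fun k => (k, [("product_id", pidf k)])) := by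
  induction l with
  | nil => intro seen; simp [pvSel]
  | cons k t ih =>
    intro seen
    by_cases h : seen.contains (pidf k) = true
    · simp only [pvSel, if_pos h]; exact ih seen
    · simp only [pvSel, if_neg h, List.map_cons]
      exact congrArg _ (ih _)

theorem pvSel_keys_sublist (pidf : String → String) (l : List String) :
    ∀ seen, ((pvSel pidf l seen).map Prod.fst).Sublist l := by
  induction l with
  | nil => intro seen; simp [pvSel]
  | cons k t ih =>
    intro seen
    by_cases h : seen.contains (pidf k) = true
    · simp only [pvSel, if_pos h]; exact (ih seen).cons k
    · simp only [pvSel, if_neg h, List.map_cons]; exact (ih _).cons₂ k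

-- the keys pvSel keeps are exactly the first keys (in l's order) of the not-yet-seen product_ids
theorem pvSel_mem_keys (pidf : String → String) (l : List String) :
    ∀ seen k, k ∈ (pvSel pidf l seen).map Prod.fst
      ↔ ∃ p, seen.contains p = false ∧ l.find? (fun x => pidf x == p) = some k := by
  induction l with
  | nil => intro seen k; simp [pvSel]
  | cons k0 t ih =>
    intro seen k
    by_cases h : seen.contains (pidf k0) = true
    · have hmem : pidf k0 ∈ seen := (pv_contains_iff _ _).mp h
      simp only [pvSel, if_pos h]
      rw [ih seen k]
      constructor
      · rintro ⟨p, hp, hf⟩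
        have hne : ¬ ((fun x => pidf x == p) k0 = true) := fun he =>
          (pv_contains_false_iff _ _).mp hp ((eq_of_beq he) ▸ hmem)
        exact ⟨p, hp, by rw [List.find?_cons_of_neg (p := fun x => pidf x == p) hne]; exact hf⟩
      · rintro ⟨p, hp, hf⟩
        have hne : ¬ ((fun x => pidf x == p) k0 = true) := fun he =>
          (pv_contains_false_iff _ _).mp hp ((eq_of_beq he) ▸ hmem)
        rw [List.find?_cons_of_neg (p := fun x => pidf x == p) hne] at hf
        exact ⟨p, hp, hf⟩
    · have h' : pidf k0 ∉ seen := fun hm => h ((pv_contains_iff _ _).mpr hm)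
      simp only [pvSel, if_neg h, List.map_cons, List.mem_cons]
      rw [ih _ k]
      constructor
      · rintro (rfl | ⟨p, hp, hf⟩)
        · refine ⟨pidf k, (pv_contains_false_iff _ _).mpr h', ?_⟩
          rw [List.find?_cons_of_pos (p := fun x => pidf x == pidf k) (by simp)]
        · have hpadd : p ∉ seen.add (pidf k0) := (pv_contains_false_iff _ _).mp hp
          have hpk0 : p ≠ pidf k0 := fun he =>
            hpadd ((PySem.Set.mem_add seen (pidf k0) p).mpr (Or.inr he))
          have hpseen : p ∉ seen := fun hm =>
            hpadd ((PySem.Set.mem_add seen (pidf k0) p).mpr (Or.inl hm))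
          refine ⟨p, (pv_contains_false_iff _ _).mpr hpseen, ?_⟩
          rw [List.find?_cons_of_neg (p := fun x => pidf x == p) (by simp [Ne.symm hpk0])]
          exact hf
      · rintro ⟨p, hp, hf⟩
        by_cases hpk : pidf k0 = p
        · rw [List.find?_cons_of_pos (p := fun x => pidf x == p) (by simp [hpk])] at hf
          exact Or.inl (Option.some_injective _ hf).symm
        · rw [List.find?_cons_of_neg (p := fun x => pidf x == p) (by simp [hpk])] at hf
          have hpseen : p ∉ seen := (pv_contains_false_iff _ _).mp hp
          have hpadd : p ∉ seen.add (pidf k0) := by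
            intro hm
            rcases (PySem.Set.mem_add seen (pidf k0) p).mp hm with hm' | hm'
            · exact hpseen hm'
            · exact hpk hm'.symm
          exact Or.inr ⟨p, (pv_contains_false_iff _ _).mpr hpadd, hf⟩

-- the whole equivalence, for an arbitrary dict with nodup keys
theorem pv_main (d : PySem.Dict String String) (hnd : d.keys.Nodup) :
    (let id_list : PySem.Set String := PySem.Set.ofList d.values
     let aux : PySem.Dict String (List (String × String)) :=
       id_list.foldl (fun aux product_id =>
         match (PySem.List.sorted d.keys (fun k => k) false).find?
                 (fun installer_path => d.getD installer_path "" == product_id) with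
         | some installer_path => aux.insert installer_path [("product_id", product_id)]
         | none => aux) PySem.Dict.empty
     ((PySem.List.sorted aux.keys (fun k => k) false).foldl
       (fun out item => out.insert item (aux.getD item [])) PySem.Dict.empty).items)
    = ((PySem.List.sorted d.keys (fun k => k) false).foldl
        (fun (st : PySem.Dict String (List (String × String)) × PySem.Set String) path =>
          if st.2.contains (d.getD path "") then st
          else (st.1.insert path [("product_id", d.getD path "")], st.2.add (d.getD path "")))
        (PySem.Dict.empty, PySem.Set.empty)).1.items := by
  dsimp only
  set ks := PySem.List.sorted d.keys (fun k => k) false with hksdef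
  set idl := PySem.Set.ofList d.values with hidldef
  set aux := idl.foldl (fun aux product_id =>
      match ks.find? (fun installer_path => d.getD installer_path "" == product_id) with
      | some installer_path => aux.insert installer_path [("product_id", product_id)]
      | none => aux) PySem.Dict.empty with hauxdef
  -- facts about the sorted key list
  have hksperm : ks.Perm d.keys := PySem.List.sorted_perm _ _ _
  have hksnd : ks.Nodup := hksperm.nodup_iff.mpr hnd
  have hkslt : ks.Pairwise (· < ·) :=
    ((PySem.List.sorted_pairwise d.keys (fun k => k)).and hksnd).imp
      (fun h => lt_of_le_of_ne h.1 h.2)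
  have hvals : d.values = d.keys.map (fun k => d.getD k "") :=
    PySem.Dict.values_eq_map_keys d hnd ""
  -- the first sorted key carrying a given product_id
  have hfk_some : ∀ p ∈ d.values, ∃ k, ks.find? (fun x => d.getD x "" == p) = some k := by
    intro p hp
    rw [hvals] at hp
    obtain ⟨k, hk, rfl⟩ := List.mem_map.mp hp
    cases hf : ks.find? (fun x => d.getD x "" == d.getD k "") with
    | some k' => exact ⟨k', rfl⟩
    | none =>
      exact absurd (by simp)
        (List.find?_eq_none.mp hf k ((PySem.List.mem_sorted d.keys (fun k => k) false k).mpr hk))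
  have hfk_mem : ∀ {p k}, ks.find? (fun x => d.getD x "" == p) = some k →
      k ∈ ks ∧ d.getD k "" = p := by
    intro p k h
    exact ⟨List.mem_of_find?_eq_some h, by have := List.find?_some h; simpa using this⟩
  have hidl_mem : ∀ p, p ∈ idl ↔ p ∈ d.values := fun p => PySem.Set.mem_ofList _ _
  -- A's aux-building loop: each product_id inserts its first sorted key, all fresh and distinct
  have haux_eq : aux = idl.foldl
      (fun a p => a.insert ((ks.find? (fun x => d.getD x "" == p)).getD "") [("product_id", p)])
      PySem.Dict.empty := by
    rw [hauxdef]
    refine PySem.List.foldl_congr_mem _ _ _ _ ?_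
    intro acc p hp
    obtain ⟨k, hk⟩ := hfk_some p ((hidl_mem p).mp hp)
    rw [hk]
    rfl
  have hinj : (idl.map (fun p => (ks.find? (fun x => d.getD x "" == p)).getD "")).Nodup := by
    refine List.Nodup.map_on ?_ (PySem.Set.nodup_ofList _)
    intro p1 h1 p2 h2 he
    obtain ⟨k1, hk1⟩ := hfk_some p1 ((hidl_mem _).mp h1)
    obtain ⟨k2, hk2⟩ := hfk_some p2 ((hidl_mem _).mp h2)
    rw [hk1, hk2] at he
    simp only [Option.getD_some] at he
    have e1 := (hfk_mem hk1).2
    have e2 := (hfk_mem hk2).2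
    rw [← e1, ← e2, he]
  have haux_items : aux.items = idl.map
      (fun p => ((ks.find? (fun x => d.getD x "" == p)).getD "", [("product_id", p)])) := by
    rw [haux_eq]
    have h := PySem.Dict.items_foldl_insert_fresh idl
      (fun p => (ks.find? (fun x => d.getD x "" == p)).getD "")
      (fun p => [("product_id", p)]) PySem.Dict.empty
      (fun a _ => PySem.Dict.contains_empty _) hinj
    simpa using h
  have haux_keys : aux.keys = idl.map (fun p => (ks.find? (fun x => d.getD x "" == p)).getD "") := by
    simp [PySem.Dict.keys, haux_items, List.map_map, Function.comp]
  have haux_keys_nd : aux.keys.Nodup := by rw [haux_keys]; exact hinj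
  have hmem_aux : ∀ k, k ∈ aux.keys ↔ ∃ p, ks.find? (fun x => d.getD x "" == p) = some k := by
    intro k
    rw [haux_keys]
    constructor
    · intro hm
      obtain ⟨p, hp, rfl⟩ := List.mem_map.mp hm
      obtain ⟨k', hk'⟩ := hfk_some p ((hidl_mem _).mp hp)
      exact ⟨p, by rw [hk']; rfl⟩
    · rintro ⟨p, hp⟩
      obtain ⟨hkks, hpk⟩ := hfk_mem hp
      have hpv : p ∈ d.values := by
        rw [hvals]
        exact List.mem_map.mpr ⟨k, (PySem.List.mem_sorted d.keys (fun k => k) false k).mp hkks, hpk⟩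
      exact List.mem_map.mpr ⟨p, (hidl_mem p).mpr hpv, by rw [hp]; rfl⟩
  -- B's kept keys
  have hSsub := pvSel_keys_sublist (fun k => d.getD k "") ks PySem.Set.empty
  have hSlt : ((pvSel (fun k => d.getD k "") ks PySem.Set.empty).map Prod.fst).Pairwise (· < ·) :=
    List.Pairwise.sublist hSsub hkslt
  have hSnd : ((pvSel (fun k => d.getD k "") ks PySem.Set.empty).map Prod.fst).Nodup :=
    hSlt.imp (fun h => ne_of_lt h)
  have hSmem : ∀ k, k ∈ (pvSel (fun k => d.getD k "") ks PySem.Set.empty).map Prod.fst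
      ↔ ∃ p, ks.find? (fun x => d.getD x "" == p) = some k := by
    intro k
    rw [pvSel_mem_keys]
    constructor
    · rintro ⟨p, _, hf⟩; exact ⟨p, by simpa using hf⟩
    · rintro ⟨p, hf⟩
      exact ⟨p, by simp [PySem.Set.contains, PySem.Set.empty], by simpa using hf⟩
  have hperm : ((pvSel (fun k => d.getD k "") ks PySem.Set.empty).map Prod.fst).Perm aux.keys :=
    (List.perm_ext_iff_of_nodup hSnd haux_keys_nd).mpr
      (fun a => by rw [hSmem a, hmem_aux a])
  have hsorted : PySem.List.sorted aux.keys (fun k => k) false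
      = (pvSel (fun k => d.getD k "") ks PySem.Set.empty).map Prod.fst :=
    PySem.List.sorted_eq_of_perm_of_pairwise_lt _ _ _ hperm hSlt
  -- A's rebuild loop appends the sorted keys with their aux values
  have hrebuild : ((PySem.List.sorted aux.keys (fun k => k) false).foldl
      (fun out item => out.insert item (aux.getD item [])) PySem.Dict.empty).items
      = (PySem.List.sorted aux.keys (fun k => k) false).map (fun k => (k, aux.getD k [])) := by
    have h := PySem.Dict.items_foldl_insert_fresh (PySem.List.sorted aux.keys (fun k => k) false)
      (fun x => x) (fun k => aux.getD k []) PySem.Dict.empty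
      (fun a _ => PySem.Dict.contains_empty _)
      (by rw [List.map_id']; rw [hsorted]; exact hSnd)
    simpa using h
  -- the stored values agree with pvSel's
  have hvalS : ∀ k ∈ (pvSel (fun k => d.getD k "") ks PySem.Set.empty).map Prod.fst,
      aux.getD k [] = [("product_id", d.getD k "")] := by
    intro k hk
    obtain ⟨p, hp⟩ := (hSmem k).mp hk
    obtain ⟨hkks, hpk⟩ := hfk_mem hp
    have hpv : p ∈ d.values := by
      rw [hvals]
      exact List.mem_map.mpr ⟨k, (PySem.List.mem_sorted d.keys (fun k => k) false k).mp hkks, hpk⟩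
    have hmem : (k, [("product_id", p)]) ∈ aux.items := by
      rw [haux_items]
      exact List.mem_map.mpr ⟨p, (hidl_mem p).mpr hpv, by rw [hp]; rfl⟩
    rw [PySem.Dict.getD_of_mem_items aux hmem haux_keys_nd, hpk]
  -- assemble
  have hB := pvSel_foldl (fun k => d.getD k "") ks PySem.Dict.empty PySem.Set.empty
    (fun k _ => PySem.Dict.contains_empty _) hksnd
  have hmapeq : List.map (fun k => (k, aux.getD k []))
        ((pvSel (fun k => d.getD k "") ks PySem.Set.empty).map Prod.fst)
      = List.map (fun k => (k, [("product_id", d.getD k "")]))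
        ((pvSel (fun k => d.getD k "") ks PySem.Set.empty).map Prod.fst) :=
    List.map_congr_left (fun a ha => by rw [hvalS a ha])
  rw [hrebuild, hsorted, hmapeq, ← pvSel_entries]
  refine Eq.symm (hB.trans ?_)
  simp [PySem.Dict.empty]

-- ===== VERDICT (by name: the statement is the Claim_ definition above) =====
theorem dedup_installers_id_spec : Claim_equal_dedup_installers_id := by
  intro installers_dict _
  unfold Spec_dedup_installers_id
  show dedup_installers_id installers_dict = dedup_installers_id_alt installers_dict
  have h := pv_main (PySem.Dict.ofList installers_dict) (PySem.Dict.nodup_keys_ofList installers_dict)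
  simpa [dedup_installers_id, dedup_installers_id_alt] using h
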